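-- pv_equiv track=rewrite | github.com/balandongiv/syira_speaking_task | feature_extractor/combine_col_name.py | rename_column_levels
-- ===== SOURCE A (Python) =====
-- FREQ_BANDS = {
--     "band0": "delta",
--     "band1": "theta",
--     "band2": "alpha",
--     "band3": "sigma",
--     "band4": "beta"
-- }
--
-- def rename_column_levels(col_tuple):
--     """
--     Renames a two-level column name according to specified rules:
--     - Process the second-level name:
--         * If it contains '/', convert it to '_div_' format.
--         * Replace band identifiers (bandX) with the actual frequency names.
--     - Returns the concatenated single-level column name.
--     """
--     first_level, second_level = col_tuple
--
--     # Process second level name if present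
--     if second_level:
--         # Handle division case: e.g., "ch12_band1/band2" -> "ch12_band1_div_band2"
--         if "/" in second_level:
--             parts = second_level.split("/")
--             if len(parts) == 2:
--                 second_level = f"{parts[0]}_div_{parts[1]}"
--
--         # Replace band identifiers with actual frequency names
--         for band, freq in FREQ_BANDS.items():
--             if band in second_level:
--                 second_level = second_level.replace(band, freq)
--
--     # Combine first and second level properly
--     return f"{first_level}_{second_level}" if second_level else first_level
-- ===== SOURCE B (Python) =====
-- _BAND_NAMES = {
--     "0": "delta",
--     "1": "theta",
--     "2": "alpha",
--     "3": "sigma",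
--     "4": "beta"
-- }
--
-- def rename_column_levels(col_tuple):
--     """Single left-to-right scan: rewrites every 'band<0-4>' occurrence in one
--     pass instead of five full-string replace passes."""
--     first_level, second_level = col_tuple
--     if second_level:
--         # Handle division case (same reshaping as before the scan)
--         if "/" in second_level:
--             parts = second_level.split("/")
--             if len(parts) == 2:
--                 second_level = f"{parts[0]}_div_{parts[1]}"
--         out = []
--         i, n = 0, len(second_level)
--         while i < n:
--             if second_level.startswith("band", i) and i + 4 < n and second_level[i + 4] in _BAND_NAMES:
--                 out.append(_BAND_NAMES[second_level[i + 4]])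
--                 i += 5
--             else:
--                 out.append(second_level[i])
--                 i += 1
--         second_level = "".join(out)
--     return f"{first_level}_{second_level}" if second_level else first_level
-- ===== Notes on version B (the rewrite author's own statement) =====
-- stated objective: alternative
-- what changed: The five sequential full-string str.replace passes over FREQ_BANDS are replaced by one left-to-right scan that rewrites each 'band0'..'band4' occurrence in a single traversal via a digit-keyed lookup table.
import Mathlib
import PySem

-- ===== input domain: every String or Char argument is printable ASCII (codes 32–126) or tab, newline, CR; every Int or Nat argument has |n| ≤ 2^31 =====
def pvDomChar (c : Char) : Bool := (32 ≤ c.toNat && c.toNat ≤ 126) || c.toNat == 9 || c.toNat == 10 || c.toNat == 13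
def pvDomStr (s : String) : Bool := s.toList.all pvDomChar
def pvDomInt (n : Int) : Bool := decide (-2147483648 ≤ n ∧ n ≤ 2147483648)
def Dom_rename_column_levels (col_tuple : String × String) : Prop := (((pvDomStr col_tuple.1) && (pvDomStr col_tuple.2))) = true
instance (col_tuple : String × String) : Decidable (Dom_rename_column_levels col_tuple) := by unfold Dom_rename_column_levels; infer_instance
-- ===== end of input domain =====

-- B replaces A's five sequential full-string replace passes by one left-to-right scan
-- with a digit-keyed lookup (alternative algorithm, same return value everywhere).

-- shared by both Pythons verbatim: the '/' → '_div_' reshaping of the second level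
def divReshape (s : List Char) : List Char :=
  if PySem.Chars.isIn ['/'] s then
    let parts := PySem.Chars.splitOn s ['/']
    if parts.length = 2 then
      PySem.List.pyGetD parts 0 [] ++ ['_', 'd', 'i', 'v', '_'] ++ PySem.List.pyGetD parts 1 []
    else s
  else s

-- ===== PORT A =====
-- FREQ_BANDS dict, as an insertion-ordered association list (str ~ List Char here)
def FREQ_BANDS : List (List Char × List Char) :=
  [(['b','a','n','d','0'], ['d','e','l','t','a']),
   (['b','a','n','d','1'], ['t','h','e','t','a']),
   (['b','a','n','d','2'], ['a','l','p','h','a']),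
   (['b','a','n','d','3'], ['s','i','g','m','a']),
   (['b','a','n','d','4'], ['b','e','t','a'])]

-- the body of A's `if second_level:` block: reshape, then the replace loop over the dict
def renameSecondA (s : List Char) : List Char :=
  List.foldl
    (fun cur bf => if PySem.Chars.isIn bf.1 cur then PySem.Chars.replace cur bf.1 bf.2 else cur)
    (divReshape s) FREQ_BANDS

def rename_column_levels (col_tuple : String × String) : String :=
  let second := if col_tuple.2.toList ≠ [] then renameSecondA col_tuple.2.toList else col_tuple.2.toList
  if second ≠ [] then String.mk (col_tuple.1.toList ++ '_' :: second) else col_tuple.1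

-- ===== PORT B =====
-- _BAND_NAMES lookup: the frequency name for a digit key, none if not a band digit
def freqOf? (d : Char) : Option (List Char) :=
  if d = '0' then some ['d','e','l','t','a']
  else if d = '1' then some ['t','h','e','t','a']
  else if d = '2' then some ['a','l','p','h','a']
  else if d = '3' then some ['s','i','g','m','a']
  else if d = '4' then some ['b','e','t','a']
  else none

-- the scan-step test: the string starts with "band" here, followed by a band digit
def bandHead? (l : List Char) : Option (List Char × List Char) :=
  if l.take 4 = ['b','a','n','d'] then
    match l.drop 4 with
    | [] => none
    | d :: rest =>
      match freqOf? d with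
      | some f => some (f, rest)
      | none => none
  else none

-- shape of a successful scan-step test (the port cites its length corollary in decreasing_by)
lemma bandHead?_some_shape {l f rest : List Char} (hb : bandHead? l = some (f, rest)) :
    ∃ d, l = 'b' :: 'a' :: 'n' :: 'd' :: d :: rest ∧ freqOf? d = some f := by
  unfold bandHead? at hb
  split_ifs at hb with ht
  · revert hb
    cases hd : l.drop 4 with
    | nil => intro hb; simp at hb
    | cons d r =>
      intro hb
      cases hf : freqOf? d with
      | none => simp [hf] at hb
      | some f' =>
        simp only [hf, Option.some.injEq, Prod.mk.injEq] at hb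
        obtain ⟨rfl, rfl⟩ := hb
        refine ⟨d, ?_, hf⟩
        have hsplit : l = l.take 4 ++ l.drop 4 := (List.take_append_drop 4 l).symm
        rw [ht, hd] at hsplit
        simpa using hsplit

lemma bandHead?_some_len {l f rest : List Char} (h : bandHead? l = some (f, rest)) :
    rest.length < l.length := by
  obtain ⟨d, rfl, -⟩ := bandHead?_some_shape h
  simp only [List.length_cons]
  omega

-- B's while loop as the obvious structural recursion
def scanGo (l : List Char) : List Char :=
  match l with
  | [] => []
  | c :: t =>
    match hb : bandHead? (c :: t) with
    | some (f, rest) => f ++ scanGo rest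
    | none => c :: scanGo t
termination_by l.length
decreasing_by
  · exact bandHead?_some_len hb
  · simp

def renameSecondB (s : List Char) : List Char := scanGo (divReshape s)

def rename_column_levels_alt (col_tuple : String × String) : String :=
  let second := if col_tuple.2.toList ≠ [] then renameSecondB col_tuple.2.toList else col_tuple.2.toList
  if second ≠ [] then String.mk (col_tuple.1.toList ++ '_' :: second) else col_tuple.1

-- ===== PRECONDITION & SPEC =====
def Spec_rename_column_levels (col_tuple : String × String) (out : String) : Prop := out = rename_column_levels_alt col_tuple
instance (col_tuple : String × String) (out : String) : Decidable (Spec_rename_column_levels col_tuple out) := by unfold Spec_rename_column_levels; infer_instance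

-- ===== CLAIM (what is proved, stated in full; the proofs are below) =====
def Claim_equal_rename_column_levels : Prop := ∀ (col_tuple : String × String), Dom_rename_column_levels col_tuple → Spec_rename_column_levels col_tuple (rename_column_levels col_tuple)

-- ===== LEMMAS AND PROOFS =====

-- reference form of PySem.Chars.replace.go without the reversed accumulator
def repl (old new : List Char) : Nat → List Char → List Char
  | 0, l => l
  | _ + 1, [] => []
  | fuel + 1, c :: t =>
    if old.isPrefixOf (c :: t) then new ++ repl old new fuel ((c :: t).drop old.length)
    else c :: repl old new fuel t

lemma go_eq_repl (old new : List Char) :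
    ∀ fuel l acc, PySem.Chars.replace.go old new fuel l acc = acc.reverse ++ repl old new fuel l := by
  intro fuel
  induction fuel with
  | zero => intro l acc; simp [PySem.Chars.replace.go, repl]
  | succ n ih =>
    intro l acc
    cases l with
    | nil => simp [PySem.Chars.replace.go, repl]
    | cons c t =>
      simp only [PySem.Chars.replace.go, repl]
      split_ifs with h
      · rw [ih]; simp
      · rw [ih]; simp

lemma replace_eq_repl {old : List Char} (hold : old ≠ []) (new l : List Char) :
    PySem.Chars.replace l old new = repl old new l.length l := by
  unfold PySem.Chars.replace
  rw [if_neg (by simp [hold]), go_eq_repl]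
  simp

lemma repl_fuel {old : List Char} (hold : old ≠ []) (new : List Char) :
    ∀ f1 f2 l, l.length ≤ f1 → l.length ≤ f2 → repl old new f1 l = repl old new f2 l := by
  intro f1
  induction f1 with
  | zero =>
    intro f2 l h1 _
    have : l = [] := List.eq_nil_of_length_eq_zero (Nat.le_zero.mp h1)
    subst this
    cases f2 <;> simp [repl]
  | succ n ih =>
    intro f2 l h1 h2
    cases l with
    | nil => cases f2 <;> simp [repl]
    | cons c t =>
      cases f2 with
      | zero => simp at h2
      | succ m =>
        obtain ⟨o, os, rfl⟩ : ∃ o os, old = o :: os := by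
          cases old with
          | nil => exact absurd rfl hold
          | cons o os => exact ⟨o, os, rfl⟩
        simp only [repl]
        split_ifs with h
        · rw [ih m]
          · simp at h1 ⊢; omega
          · simp at h2 ⊢; omega
        · rw [ih m]
          · simp at h1; omega
          · simp at h2; omega

lemma replace_nil {old : List Char} (hold : old ≠ []) (new : List Char) :
    PySem.Chars.replace [] old new = [] := by
  rw [replace_eq_repl hold]; simp [repl]

lemma replace_cons_no {old : List Char} (hold : old ≠ []) (new : List Char) {c : Char} {t : List Char}
    (h : old.isPrefixOf (c :: t) = false) :
    PySem.Chars.replace (c :: t) old new = c :: PySem.Chars.replace t old new := by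
  rw [replace_eq_repl hold, replace_eq_repl hold]
  simp only [List.length_cons, repl]
  rw [if_neg (by simp [h])]

lemma replace_pref {old : List Char} (hold : old ≠ []) (new : List Char) {l : List Char}
    (h : old.isPrefixOf l = true) :
    PySem.Chars.replace l old new = new ++ PySem.Chars.replace (l.drop old.length) old new := by
  obtain ⟨o, os, rfl⟩ : ∃ o os, old = o :: os := by
    cases old with
    | nil => exact absurd rfl hold
    | cons o os => exact ⟨o, os, rfl⟩
  cases l with
  | nil => simp [List.isPrefixOf] at h
  | cons c t =>
    rw [replace_eq_repl hold, replace_eq_repl hold]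
    simp only [List.length_cons, repl]
    rw [if_pos h]
    congr 1
    apply repl_fuel hold
    · simp
    · simp

lemma replace_of_not_infix {old : List Char} (hold : old ≠ []) (new : List Char) :
    ∀ {l : List Char}, ¬ old <:+: l → PySem.Chars.replace l old new = l := by
  intro l
  induction l with
  | nil => intro _; exact replace_nil hold new
  | cons c t ih =>
    intro h
    have hnp : old.isPrefixOf (c :: t) = false := by
      rw [Bool.eq_false_iff]
      intro hc
      exact h (List.isPrefixOf_iff_prefix.mp hc).isInfix
    rw [replace_cons_no hold new hnp, ih (fun hi => h (List.infix_cons hi))]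

-- the replace loop body: the `in` guard is redundant
lemma step_eq {b : List Char} (hb : b ≠ []) (f s : List Char) :
    (if PySem.Chars.isIn b s then PySem.Chars.replace s b f else s) = PySem.Chars.replace s b f := by
  cases h : PySem.Chars.isIn b s with
  | true => simp
  | false =>
    have hni : ¬ b <:+: s := fun hin => by
      rw [(PySem.Chars.isIn_iff_infix b s).mpr hin] at h
      cases h
    simp [replace_of_not_infix hb f hni]

-- peel a word that the pattern cannot match into
lemma replace_word {old : List Char} (hold : old ≠ []) (new : List Char) (w X : List Char)
    (hw : ∀ k, k < w.length → old.isPrefixOf (w.drop k ++ X) = false) :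
    PySem.Chars.replace (w ++ X) old new = w ++ PySem.Chars.replace X old new := by
  induction w with
  | nil => simp
  | cons c t ih =>
    have h0 := hw 0 (by simp)
    simp only [List.drop_zero] at h0
    rw [List.cons_append, replace_cons_no hold new (by simpa using h0)]
    rw [ih (fun k hk => by simpa using hw (k + 1) (by simp; omega))]
    simp

-- a prefix that cannot begin inside the replacement word survives replace backwards
lemma prefix_thru {old : List Char} (hold : old ≠ []) (new : List Char) :
    ∀ (l p : List Char),
      (∀ k, k < p.length → ∀ x, ((p.drop k).isPrefixOf (new ++ x)) = false) →
      p.isPrefixOf (PySem.Chars.replace l old new) = true → p.isPrefixOf l = true := by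
  intro l
  induction l with
  | nil =>
    intro p hb hp
    rwa [replace_nil hold] at hp
  | cons c t ih =>
    intro p hb hp
    by_cases hm : old.isPrefixOf (c :: t) = true
    · rw [replace_pref hold new hm] at hp
      cases p with
      | nil => simp
      | cons a q =>
        have hfalse := hb 0 (by simp) (PySem.Chars.replace ((c :: t).drop old.length) old new)
        simp only [List.drop_zero] at hfalse
        rw [hp] at hfalse
        cases hfalse
    · rw [Bool.not_eq_true] at hm
      rw [replace_cons_no hold new hm] at hp
      cases p with
      | nil => simp
      | cons a q =>
        simp only [List.isPrefixOf, Bool.and_eq_true, beq_iff_eq] at hp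
        obtain ⟨rfl, hq⟩ := hp
        have hq' := ih q (fun k hk x => by simpa using hb (k + 1) (by simp; omega) x) hq
        simp [List.isPrefixOf, hq']

-- no suffix of "and<digit>" can begin a frequency word
lemma blocked (d : Char) (hd : d ∈ (['0','1','2','3','4'] : List Char))
    (w : List Char)
    (hw : w ∈ [['d','e','l','t','a'],['t','h','e','t','a'],['a','l','p','h','a'],['s','i','g','m','a'],['b','e','t','a']])
    (k : Nat) (hk : k < 4) (x : List Char) :
    (((['a','n','d',d] : List Char).drop k).isPrefixOf (w ++ x)) = false := by
  fin_cases hd <;> fin_cases hw <;> interval_cases k <;> simp [List.isPrefixOf]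

lemma and_thru (d : Char) (hd : d ∈ (['0','1','2','3','4'] : List Char))
    (b : List Char) (hb : b ≠ []) (f : List Char)
    (hf : f ∈ [['d','e','l','t','a'],['t','h','e','t','a'],['a','l','p','h','a'],['s','i','g','m','a'],['b','e','t','a']])
    (X : List Char)
    (h : (['a','n','d',d] : List Char).isPrefixOf (PySem.Chars.replace X b f) = true) :
    (['a','n','d',d] : List Char).isPrefixOf X = true :=
  prefix_thru hb f X ['a','n','d',d] (fun k hk x => blocked d hd f hf k (by simpa using hk) x) h

-- lift "band<d> is not a prefix" through one replace layer
lemma not_prefix_lift (d : Char) (c : Char) (t X : List Char)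
    (hX : (['a','n','d',d] : List Char).isPrefixOf X = true → (['a','n','d',d] : List Char).isPrefixOf t = true)
    (h : (['b','a','n','d',d] : List Char).isPrefixOf (c :: t) = false) :
    (['b','a','n','d',d] : List Char).isPrefixOf (c :: X) = false := by
  by_contra hc
  rw [Bool.not_eq_false] at hc
  simp only [List.isPrefixOf, Bool.and_eq_true, beq_iff_eq] at hc
  obtain ⟨rfl, hpre⟩ := hc
  have hand := hX (by simpa [List.isPrefixOf] using hpre)
  simp only [List.isPrefixOf] at h hand
  simp [hand] at h

lemma bandHead?_none_no {l : List Char} (hb : bandHead? l = none) (d : Char)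
    (hd : freqOf? d ≠ none) :
    (['b','a','n','d',d] : List Char).isPrefixOf l = false := by
  by_contra hc
  rw [Bool.not_eq_false, List.isPrefixOf_iff_prefix] at hc
  obtain ⟨rest, rfl⟩ := hc
  cases hf : freqOf? d with
  | none => exact hd hf
  | some f => simp [bandHead?, hf] at hb

lemma freqOf?_some_digit {d : Char} {f : List Char} (hf : freqOf? d = some f) :
    (d = '0' ∧ f = ['d','e','l','t','a']) ∨ (d = '1' ∧ f = ['t','h','e','t','a']) ∨
    (d = '2' ∧ f = ['a','l','p','h','a']) ∨ (d = '3' ∧ f = ['s','i','g','m','a']) ∨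
    (d = '4' ∧ f = ['b','e','t','a']) := by
  unfold freqOf? at hf
  split_ifs at hf <;> simp_all

-- scan equations
lemma scanGo_nil : scanGo [] = [] := by
  rw [scanGo.eq_def]

lemma scanGo_some {c : Char} {t f rest : List Char} (hb : bandHead? (c :: t) = some (f, rest)) :
    scanGo (c :: t) = f ++ scanGo rest := by
  rw [scanGo.eq_def]
  split
  · simp_all
  · split <;> simp_all

lemma scanGo_none {c : Char} {t : List Char} (hb : bandHead? (c :: t) = none) :
    scanGo (c :: t) = c :: scanGo t := by
  rw [scanGo.eq_def]
  split
  · simp_all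
  · split <;> simp_all

-- the five chained replaces
def chainR (l : List Char) : List Char :=
  PySem.Chars.replace
    (PySem.Chars.replace
      (PySem.Chars.replace
        (PySem.Chars.replace
          (PySem.Chars.replace l ['b','a','n','d','0'] ['d','e','l','t','a'])
          ['b','a','n','d','1'] ['t','h','e','t','a'])
        ['b','a','n','d','2'] ['a','l','p','h','a'])
      ['b','a','n','d','3'] ['s','i','g','m','a'])
    ['b','a','n','d','4'] ['b','e','t','a']

lemma fold_eq (s : List Char) : renameSecondA s = chainR (divReshape s) := by
  unfold renameSecondA chainR FREQ_BANDS
  simp only [List.foldl]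
  rw [step_eq (by decide), step_eq (by decide), step_eq (by decide), step_eq (by decide),
    step_eq (by decide)]

lemma chain_band0 (rest : List Char) :
    chainR (['b','a','n','d','0'] ++ rest) = ['d','e','l','t','a'] ++ chainR rest := by
  unfold chainR
  rw [replace_pref (show (['b','a','n','d','0'] : List Char) ≠ [] by decide) ['d','e','l','t','a'] (by simp [List.isPrefixOf]), List.drop_left]
  rw [replace_word (show (['b','a','n','d','1'] : List Char) ≠ [] by decide) ['t','h','e','t','a'] (['d','e','l','t','a']) (PySem.Chars.replace (rest) ['b','a','n','d','0'] ['d','e','l','t','a']) (by intro j hj; simp at hj; interval_cases j <;> simp [List.isPrefixOf])]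
  rw [replace_word (show (['b','a','n','d','2'] : List Char) ≠ [] by decide) ['a','l','p','h','a'] (['d','e','l','t','a']) (PySem.Chars.replace (PySem.Chars.replace (rest) ['b','a','n','d','0'] ['d','e','l','t','a']) ['b','a','n','d','1'] ['t','h','e','t','a']) (by intro j hj; simp at hj; interval_cases j <;> simp [List.isPrefixOf])]
  rw [replace_word (show (['b','a','n','d','3'] : List Char) ≠ [] by decide) ['s','i','g','m','a'] (['d','e','l','t','a']) (PySem.Chars.replace (PySem.Chars.replace (PySem.Chars.replace (rest) ['b','a','n','d','0'] ['d','e','l','t','a']) ['b','a','n','d','1'] ['t','h','e','t','a']) ['b','a','n','d','2'] ['a','l','p','h','a']) (by intro j hj; simp at hj; interval_cases j <;> simp [List.isPrefixOf])]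
  rw [replace_word (show (['b','a','n','d','4'] : List Char) ≠ [] by decide) ['b','e','t','a'] (['d','e','l','t','a']) (PySem.Chars.replace (PySem.Chars.replace (PySem.Chars.replace (PySem.Chars.replace (rest) ['b','a','n','d','0'] ['d','e','l','t','a']) ['b','a','n','d','1'] ['t','h','e','t','a']) ['b','a','n','d','2'] ['a','l','p','h','a']) ['b','a','n','d','3'] ['s','i','g','m','a']) (by intro j hj; simp at hj; interval_cases j <;> simp [List.isPrefixOf])]

lemma chain_band1 (rest : List Char) :
    chainR (['b','a','n','d','1'] ++ rest) = ['t','h','e','t','a'] ++ chainR rest := by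
  unfold chainR
  rw [replace_word (show (['b','a','n','d','0'] : List Char) ≠ [] by decide) ['d','e','l','t','a'] (['b','a','n','d','1']) (rest) (by intro j hj; simp at hj; interval_cases j <;> simp [List.isPrefixOf])]
  rw [replace_pref (show (['b','a','n','d','1'] : List Char) ≠ [] by decide) ['t','h','e','t','a'] (by simp [List.isPrefixOf]), List.drop_left]
  rw [replace_word (show (['b','a','n','d','2'] : List Char) ≠ [] by decide) ['a','l','p','h','a'] (['t','h','e','t','a']) (PySem.Chars.replace (PySem.Chars.replace (rest) ['b','a','n','d','0'] ['d','e','l','t','a']) ['b','a','n','d','1'] ['t','h','e','t','a']) (by intro j hj; simp at hj; interval_cases j <;> simp [List.isPrefixOf])]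
  rw [replace_word (show (['b','a','n','d','3'] : List Char) ≠ [] by decide) ['s','i','g','m','a'] (['t','h','e','t','a']) (PySem.Chars.replace (PySem.Chars.replace (PySem.Chars.replace (rest) ['b','a','n','d','0'] ['d','e','l','t','a']) ['b','a','n','d','1'] ['t','h','e','t','a']) ['b','a','n','d','2'] ['a','l','p','h','a']) (by intro j hj; simp at hj; interval_cases j <;> simp [List.isPrefixOf])]
  rw [replace_word (show (['b','a','n','d','4'] : List Char) ≠ [] by decide) ['b','e','t','a'] (['t','h','e','t','a']) (PySem.Chars.replace (PySem.Chars.replace (PySem.Chars.replace (PySem.Chars.replace (rest) ['b','a','n','d','0'] ['d','e','l','t','a']) ['b','a','n','d','1'] ['t','h','e','t','a']) ['b','a','n','d','2'] ['a','l','p','h','a']) ['b','a','n','d','3'] ['s','i','g','m','a']) (by intro j hj; simp at hj; interval_cases j <;> simp [List.isPrefixOf])]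

lemma chain_band2 (rest : List Char) :
    chainR (['b','a','n','d','2'] ++ rest) = ['a','l','p','h','a'] ++ chainR rest := by
  unfold chainR
  rw [replace_word (show (['b','a','n','d','0'] : List Char) ≠ [] by decide) ['d','e','l','t','a'] (['b','a','n','d','2']) (rest) (by intro j hj; simp at hj; interval_cases j <;> simp [List.isPrefixOf])]
  rw [replace_word (show (['b','a','n','d','1'] : List Char) ≠ [] by decide) ['t','h','e','t','a'] (['b','a','n','d','2']) (PySem.Chars.replace (rest) ['b','a','n','d','0'] ['d','e','l','t','a']) (by intro j hj; simp at hj; interval_cases j <;> simp [List.isPrefixOf])]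
  rw [replace_pref (show (['b','a','n','d','2'] : List Char) ≠ [] by decide) ['a','l','p','h','a'] (by simp [List.isPrefixOf]), List.drop_left]
  rw [replace_word (show (['b','a','n','d','3'] : List Char) ≠ [] by decide) ['s','i','g','m','a'] (['a','l','p','h','a']) (PySem.Chars.replace (PySem.Chars.replace (PySem.Chars.replace (rest) ['b','a','n','d','0'] ['d','e','l','t','a']) ['b','a','n','d','1'] ['t','h','e','t','a']) ['b','a','n','d','2'] ['a','l','p','h','a']) (by intro j hj; simp at hj; interval_cases j <;> simp [List.isPrefixOf])]
  rw [replace_word (show (['b','a','n','d','4'] : List Char) ≠ [] by decide) ['b','e','t','a'] (['a','l','p','h','a']) (PySem.Chars.replace (PySem.Chars.replace (PySem.Chars.replace (PySem.Chars.replace (rest) ['b','a','n','d','0'] ['d','e','l','t','a']) ['b','a','n','d','1'] ['t','h','e','t','a']) ['b','a','n','d','2'] ['a','l','p','h','a']) ['b','a','n','d','3'] ['s','i','g','m','a']) (by intro j hj; simp at hj; interval_cases j <;> simp [List.isPrefixOf])]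

lemma chain_band3 (rest : List Char) :
    chainR (['b','a','n','d','3'] ++ rest) = ['s','i','g','m','a'] ++ chainR rest := by
  unfold chainR
  rw [replace_word (show (['b','a','n','d','0'] : List Char) ≠ [] by decide) ['d','e','l','t','a'] (['b','a','n','d','3']) (rest) (by intro j hj; simp at hj; interval_cases j <;> simp [List.isPrefixOf])]
  rw [replace_word (show (['b','a','n','d','1'] : List Char) ≠ [] by decide) ['t','h','e','t','a'] (['b','a','n','d','3']) (PySem.Chars.replace (rest) ['b','a','n','d','0'] ['d','e','l','t','a']) (by intro j hj; simp at hj; interval_cases j <;> simp [List.isPrefixOf])]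
  rw [replace_word (show (['b','a','n','d','2'] : List Char) ≠ [] by decide) ['a','l','p','h','a'] (['b','a','n','d','3']) (PySem.Chars.replace (PySem.Chars.replace (rest) ['b','a','n','d','0'] ['d','e','l','t','a']) ['b','a','n','d','1'] ['t','h','e','t','a']) (by intro j hj; simp at hj; interval_cases j <;> simp [List.isPrefixOf])]
  rw [replace_pref (show (['b','a','n','d','3'] : List Char) ≠ [] by decide) ['s','i','g','m','a'] (by simp [List.isPrefixOf]), List.drop_left]
  rw [replace_word (show (['b','a','n','d','4'] : List Char) ≠ [] by decide) ['b','e','t','a'] (['s','i','g','m','a']) (PySem.Chars.replace (PySem.Chars.replace (PySem.Chars.replace (PySem.Chars.replace (rest) ['b','a','n','d','0'] ['d','e','l','t','a']) ['b','a','n','d','1'] ['t','h','e','t','a']) ['b','a','n','d','2'] ['a','l','p','h','a']) ['b','a','n','d','3'] ['s','i','g','m','a']) (by intro j hj; simp at hj; interval_cases j <;> simp [List.isPrefixOf])]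

lemma chain_band4 (rest : List Char) :
    chainR (['b','a','n','d','4'] ++ rest) = ['b','e','t','a'] ++ chainR rest := by
  unfold chainR
  rw [replace_word (show (['b','a','n','d','0'] : List Char) ≠ [] by decide) ['d','e','l','t','a'] (['b','a','n','d','4']) (rest) (by intro j hj; simp at hj; interval_cases j <;> simp [List.isPrefixOf])]
  rw [replace_word (show (['b','a','n','d','1'] : List Char) ≠ [] by decide) ['t','h','e','t','a'] (['b','a','n','d','4']) (PySem.Chars.replace (rest) ['b','a','n','d','0'] ['d','e','l','t','a']) (by intro j hj; simp at hj; interval_cases j <;> simp [List.isPrefixOf])]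
  rw [replace_word (show (['b','a','n','d','2'] : List Char) ≠ [] by decide) ['a','l','p','h','a'] (['b','a','n','d','4']) (PySem.Chars.replace (PySem.Chars.replace (rest) ['b','a','n','d','0'] ['d','e','l','t','a']) ['b','a','n','d','1'] ['t','h','e','t','a']) (by intro j hj; simp at hj; interval_cases j <;> simp [List.isPrefixOf])]
  rw [replace_word (show (['b','a','n','d','3'] : List Char) ≠ [] by decide) ['s','i','g','m','a'] (['b','a','n','d','4']) (PySem.Chars.replace (PySem.Chars.replace (PySem.Chars.replace (rest) ['b','a','n','d','0'] ['d','e','l','t','a']) ['b','a','n','d','1'] ['t','h','e','t','a']) ['b','a','n','d','2'] ['a','l','p','h','a']) (by intro j hj; simp at hj; interval_cases j <;> simp [List.isPrefixOf])]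
  rw [replace_pref (show (['b','a','n','d','4'] : List Char) ≠ [] by decide) ['b','e','t','a'] (by simp [List.isPrefixOf]), List.drop_left]

lemma chain_eq : ∀ n (l : List Char), l.length ≤ n → chainR l = scanGo l := by
  intro n
  induction n with
  | zero =>
    intro l h
    have hl : l = [] := List.eq_nil_of_length_eq_zero (Nat.le_zero.mp h)
    subst hl
    unfold chainR
    rw [replace_nil (by decide), replace_nil (by decide), replace_nil (by decide),
      replace_nil (by decide), replace_nil (by decide), scanGo_nil]
  | succ n ih =>
    intro l hlen
    cases l with
    | nil =>
      unfold chainR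
      rw [replace_nil (by decide), replace_nil (by decide), replace_nil (by decide),
        replace_nil (by decide), replace_nil (by decide), scanGo_nil]
    | cons c t =>
      cases hb : bandHead? (c :: t) with
      | some pr =>
        obtain ⟨f, rest⟩ := pr
        obtain ⟨d, hshape, hf⟩ := bandHead?_some_shape hb
        obtain ⟨rfl, rfl⟩ : c = 'b' ∧ t = 'a' :: 'n' :: 'd' :: d :: rest := by
          injection hshape with h1 h2
          exact ⟨h1, h2⟩
        rcases freqOf?_some_digit hf with ⟨rfl, rfl⟩ | ⟨rfl, rfl⟩ | ⟨rfl, rfl⟩ | ⟨rfl, rfl⟩ | ⟨rfl, rfl⟩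
        · have hsplit : ('b' :: 'a' :: 'n' :: 'd' :: '0' :: rest : List Char) = ['b','a','n','d','0'] ++ rest := rfl
          rw [scanGo_some hb, hsplit, chain_band0, ih rest (by simp at hlen; omega)]
        · have hsplit : ('b' :: 'a' :: 'n' :: 'd' :: '1' :: rest : List Char) = ['b','a','n','d','1'] ++ rest := rfl
          rw [scanGo_some hb, hsplit, chain_band1, ih rest (by simp at hlen; omega)]
        · have hsplit : ('b' :: 'a' :: 'n' :: 'd' :: '2' :: rest : List Char) = ['b','a','n','d','2'] ++ rest := rfl
          rw [scanGo_some hb, hsplit, chain_band2, ih rest (by simp at hlen; omega)]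
        · have hsplit : ('b' :: 'a' :: 'n' :: 'd' :: '3' :: rest : List Char) = ['b','a','n','d','3'] ++ rest := rfl
          rw [scanGo_some hb, hsplit, chain_band3, ih rest (by simp at hlen; omega)]
        · have hsplit : ('b' :: 'a' :: 'n' :: 'd' :: '4' :: rest : List Char) = ['b','a','n','d','4'] ++ rest := rfl
          rw [scanGo_some hb, hsplit, chain_band4, ih rest (by simp at hlen; omega)]
      | none =>
        have h0 := bandHead?_none_no hb '0' (by decide)
        have h1 := bandHead?_none_no hb '1' (by decide)
        have h2 := bandHead?_none_no hb '2' (by decide)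
        have h3 := bandHead?_none_no hb '3' (by decide)
        have h4 := bandHead?_none_no hb '4' (by decide)
        have e0 : PySem.Chars.replace (c :: t) ['b','a','n','d','0'] ['d','e','l','t','a'] = c :: PySem.Chars.replace (t) ['b','a','n','d','0'] ['d','e','l','t','a'] :=
          replace_cons_no (by decide) ['d','e','l','t','a'] h0
        have p1 : (['b','a','n','d','1'] : List Char).isPrefixOf (c :: PySem.Chars.replace (t) ['b','a','n','d','0'] ['d','e','l','t','a']) = false :=
          not_prefix_lift '1' c t (PySem.Chars.replace (t) ['b','a','n','d','0'] ['d','e','l','t','a']) (fun hp => and_thru '1' (by decide) ['b','a','n','d','0'] (by decide) ['d','e','l','t','a'] (by decide) (t) (hp)) h1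
        have e1 : PySem.Chars.replace (c :: PySem.Chars.replace (t) ['b','a','n','d','0'] ['d','e','l','t','a']) ['b','a','n','d','1'] ['t','h','e','t','a'] = c :: PySem.Chars.replace (PySem.Chars.replace (t) ['b','a','n','d','0'] ['d','e','l','t','a']) ['b','a','n','d','1'] ['t','h','e','t','a'] :=
          replace_cons_no (by decide) ['t','h','e','t','a'] p1
        have p2 : (['b','a','n','d','2'] : List Char).isPrefixOf (c :: PySem.Chars.replace (PySem.Chars.replace (t) ['b','a','n','d','0'] ['d','e','l','t','a']) ['b','a','n','d','1'] ['t','h','e','t','a']) = false :=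
          not_prefix_lift '2' c t (PySem.Chars.replace (PySem.Chars.replace (t) ['b','a','n','d','0'] ['d','e','l','t','a']) ['b','a','n','d','1'] ['t','h','e','t','a']) (fun hp => and_thru '2' (by decide) ['b','a','n','d','0'] (by decide) ['d','e','l','t','a'] (by decide) (t) (and_thru '2' (by decide) ['b','a','n','d','1'] (by decide) ['t','h','e','t','a'] (by decide) (PySem.Chars.replace (t) ['b','a','n','d','0'] ['d','e','l','t','a']) (hp))) h2
        have e2 : PySem.Chars.replace (c :: PySem.Chars.replace (PySem.Chars.replace (t) ['b','a','n','d','0'] ['d','e','l','t','a']) ['b','a','n','d','1'] ['t','h','e','t','a']) ['b','a','n','d','2'] ['a','l','p','h','a'] = c :: PySem.Chars.replace (PySem.Chars.replace (PySem.Chars.replace (t) ['b','a','n','d','0'] ['d','e','l','t','a']) ['b','a','n','d','1'] ['t','h','e','t','a']) ['b','a','n','d','2'] ['a','l','p','h','a'] :=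
          replace_cons_no (by decide) ['a','l','p','h','a'] p2
        have p3 : (['b','a','n','d','3'] : List Char).isPrefixOf (c :: PySem.Chars.replace (PySem.Chars.replace (PySem.Chars.replace (t) ['b','a','n','d','0'] ['d','e','l','t','a']) ['b','a','n','d','1'] ['t','h','e','t','a']) ['b','a','n','d','2'] ['a','l','p','h','a']) = false :=
          not_prefix_lift '3' c t (PySem.Chars.replace (PySem.Chars.replace (PySem.Chars.replace (t) ['b','a','n','d','0'] ['d','e','l','t','a']) ['b','a','n','d','1'] ['t','h','e','t','a']) ['b','a','n','d','2'] ['a','l','p','h','a']) (fun hp => and_thru '3' (by decide) ['b','a','n','d','0'] (by decide) ['d','e','l','t','a'] (by decide) (t) (and_thru '3' (by decide) ['b','a','n','d','1'] (by decide) ['t','h','e','t','a'] (by decide) (PySem.Chars.replace (t) ['b','a','n','d','0'] ['d','e','l','t','a']) (and_thru '3' (by decide) ['b','a','n','d','2'] (by decide) ['a','l','p','h','a'] (by decide) (PySem.Chars.replace (PySem.Chars.replace (t) ['b','a','n','d','0'] ['d','e','l','t','a']) ['b','a','n','d','1'] ['t','h','e','t','a']) (hp)))) h3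
        have e3 : PySem.Chars.replace (c :: PySem.Chars.replace (PySem.Chars.replace (PySem.Chars.replace (t) ['b','a','n','d','0'] ['d','e','l','t','a']) ['b','a','n','d','1'] ['t','h','e','t','a']) ['b','a','n','d','2'] ['a','l','p','h','a']) ['b','a','n','d','3'] ['s','i','g','m','a'] = c :: PySem.Chars.replace (PySem.Chars.replace (PySem.Chars.replace (PySem.Chars.replace (t) ['b','a','n','d','0'] ['d','e','l','t','a']) ['b','a','n','d','1'] ['t','h','e','t','a']) ['b','a','n','d','2'] ['a','l','p','h','a']) ['b','a','n','d','3'] ['s','i','g','m','a'] :=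
          replace_cons_no (by decide) ['s','i','g','m','a'] p3
        have p4 : (['b','a','n','d','4'] : List Char).isPrefixOf (c :: PySem.Chars.replace (PySem.Chars.replace (PySem.Chars.replace (PySem.Chars.replace (t) ['b','a','n','d','0'] ['d','e','l','t','a']) ['b','a','n','d','1'] ['t','h','e','t','a']) ['b','a','n','d','2'] ['a','l','p','h','a']) ['b','a','n','d','3'] ['s','i','g','m','a']) = false :=
          not_prefix_lift '4' c t (PySem.Chars.replace (PySem.Chars.replace (PySem.Chars.replace (PySem.Chars.replace (t) ['b','a','n','d','0'] ['d','e','l','t','a']) ['b','a','n','d','1'] ['t','h','e','t','a']) ['b','a','n','d','2'] ['a','l','p','h','a']) ['b','a','n','d','3'] ['s','i','g','m','a']) (fun hp => and_thru '4' (by decide) ['b','a','n','d','0'] (by decide) ['d','e','l','t','a'] (by decide) (t) (and_thru '4' (by decide) ['b','a','n','d','1'] (by decide) ['t','h','e','t','a'] (by decide) (PySem.Chars.replace (t) ['b','a','n','d','0'] ['d','e','l','t','a']) (and_thru '4' (by decide) ['b','a','n','d','2'] (by decide) ['a','l','p','h','a'] (by decide) (PySem.Chars.replace (PySem.Chars.replace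 (t) ['b','a','n','d','0'] ['d','e','l','t','a']) ['b','a','n','d','1'] ['t','h','e','t','a']) (and_thru '4' (by decide) ['b','a','n','d','3'] (by decide) ['s','i','g','m','a'] (by decide) (PySem.Chars.replace (PySem.Chars.replace (PySem.Chars.replace (t) ['b','a','n','d','0'] ['d','e','l','t','a']) ['b','a','n','d','1'] ['t','h','e','t','a']) ['b','a','n','d','2'] ['a','l','p','h','a']) (hp))))) h4
        have e4 : PySem.Chars.replace (c :: PySem.Chars.replace (PySem.Chars.replace (PySem.Chars.replace (PySem.Chars.replace (t) ['b','a','n','d','0'] ['d','e','l','t','a']) ['b','a','n','d','1'] ['t','h','e','t','a']) ['b','a','n','d','2'] ['a','l','p','h','a']) ['b','a','n','d','3'] ['s','i','g','m','a']) ['b','a','n','d','4'] ['b','e','t','a'] = c :: PySem.Chars.replace (PySem.Chars.replace (PySem.Chars.replace (PySem.Chars.replace (PySem.Chars.replace (t) ['b','a','n','d','0'] ['d','e','l','t','a']) ['b','a','n','d','1'] ['t','h','e','t','a']) ['b','a','n','d','2'] ['a','l','p','h','a']) ['b','a','n','d','3'] ['s','i','g','m','a']) ['b','a','n','d','4'] ['b','e','t','a']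 :=
          replace_cons_no (by decide) ['b','e','t','a'] p4
        calc chainR (c :: t) = c :: chainR t := by
              unfold chainR; rw [e0, e1, e2, e3, e4]
          _ = c :: scanGo t := by rw [ih t (by simp at hlen; omega)]
          _ = scanGo (c :: t) := (scanGo_none hb).symm

lemma second_eq (s : List Char) : renameSecondA s = renameSecondB s := by
  rw [fold_eq]
  unfold renameSecondB
  exact chain_eq (divReshape s).length _ le_rfl

-- ===== VERDICT (by name: the statement is the Claim_ definition above) =====
theorem rename_column_levels_spec : Claim_equal_rename_column_levels := by
  intro ct _
  unfold Spec_rename_column_levels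
  simp only [rename_column_levels, rename_column_levels_alt, second_eq]
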